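-- pv_equiv track=rewrite | github.com/Lukasge02/Streamworks-KI | backend/models/parameter_models.py | classify_parameter_scope
-- ===== SOURCE A (Python) =====
-- from typing import Optional, List, Union, Any, Dict
-- from enum import Enum
--
-- class ParameterScope(str, Enum):
--     """Parameter-Scope für hierarchische Stream-Konfiguration"""
--     STREAM = "stream"
--     JOB = "job"
--     UNKNOWN = "unknown"
--
-- STREAM_LEVEL_PARAMETERS = {
--     "StreamName", "StreamDocumentation", "MaxStreamRuns", "ShortDescription",
--     "SchedulingRequiredFlag", "StreamRunDeletionType", "JobName", "JobCategory",
--     "IsNotificationRequired"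
-- }
--
-- JOB_LEVEL_PARAMETERS = {
--     "SAP": {"system", "report", "variant", "batch_user"},
--     "FILE_TRANSFER": {"source_agent", "target_agent", "source_path", "target_path"},
--     "CUSTOM": {"ResourceName", "ShortDescription", "Status", "MaxParallelAllocations",
--                "AutoReleaseFlag", "LogicalResourceType", "MasterLogicalResourceId",
--                "DefaultMaxParallelAllocations"}
-- }
--
-- def classify_parameter_scope(parameter_name: str, context_job_type: Optional[str] = None) -> ParameterScope:
--     """Klassifiziert Parameter-Scope basierend auf Name und Kontext"""
--
--     # Stream-Level Parameter prüfen
--     if parameter_name in STREAM_LEVEL_PARAMETERS: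
--         return ParameterScope.STREAM
--
--     # Job-Level Parameter prüfen
--     if context_job_type and context_job_type in JOB_LEVEL_PARAMETERS:
--         if parameter_name in JOB_LEVEL_PARAMETERS[context_job_type]:
--             return ParameterScope.JOB
--
--     # Alle Job-Types durchsuchen
--     for job_type, params in JOB_LEVEL_PARAMETERS.items():
--         if parameter_name in params:
--             return ParameterScope.JOB
--
--     return ParameterScope.UNKNOWN
-- ===== SOURCE B (Python) =====
-- from typing import Optional
-- from enum import Enum
--
-- class ParameterScope(str, Enum):
--     STREAM = "stream"
--     JOB = "job"
--     UNKNOWN = "unknown"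
--
-- STREAM_LEVEL_PARAMETERS = {
--     "StreamName", "StreamDocumentation", "MaxStreamRuns", "ShortDescription",
--     "SchedulingRequiredFlag", "StreamRunDeletionType", "JobName", "JobCategory",
--     "IsNotificationRequired"
-- }
--
-- JOB_LEVEL_PARAMETERS = {
--     "SAP": {"system", "report", "variant", "batch_user"},
--     "FILE_TRANSFER": {"source_agent", "target_agent", "source_path", "target_path"},
--     "CUSTOM": {"ResourceName", "ShortDescription", "Status", "MaxParallelAllocations",
--                "AutoReleaseFlag", "LogicalResourceType", "MasterLogicalResourceId",
--                "DefaultMaxParallelAllocations"}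
-- }
--
-- # Precomputed inverted index: parameter name -> scope.  Job entries are written
-- # first and stream entries overwrite them, encoding A's stream-before-job priority
-- # in the table itself; the classifier is then a single lookup with a default.
-- _PARAM_SCOPE = {}
-- for _params in JOB_LEVEL_PARAMETERS.values():
--     for _p in _params:
--         _PARAM_SCOPE[_p] = ParameterScope.JOB
-- for _p in STREAM_LEVEL_PARAMETERS:
--     _PARAM_SCOPE[_p] = ParameterScope.STREAM
--
-- def classify_parameter_scope(parameter_name: str, context_job_type: Optional[str] = None) -> ParameterScope:
--     return _PARAM_SCOPE.get(parameter_name, ParameterScope.UNKNOWN)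
-- ===== Notes on version B (the rewrite author's own statement) =====
-- stated objective: alternative
-- what changed: B builds an inverted index once (parameter name -> scope, with stream entries overwriting job entries to encode A's priority) and the classifier becomes a single dict lookup with a default, replacing A's staged membership tests, context branch and per-job-type loop.
import Mathlib
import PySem

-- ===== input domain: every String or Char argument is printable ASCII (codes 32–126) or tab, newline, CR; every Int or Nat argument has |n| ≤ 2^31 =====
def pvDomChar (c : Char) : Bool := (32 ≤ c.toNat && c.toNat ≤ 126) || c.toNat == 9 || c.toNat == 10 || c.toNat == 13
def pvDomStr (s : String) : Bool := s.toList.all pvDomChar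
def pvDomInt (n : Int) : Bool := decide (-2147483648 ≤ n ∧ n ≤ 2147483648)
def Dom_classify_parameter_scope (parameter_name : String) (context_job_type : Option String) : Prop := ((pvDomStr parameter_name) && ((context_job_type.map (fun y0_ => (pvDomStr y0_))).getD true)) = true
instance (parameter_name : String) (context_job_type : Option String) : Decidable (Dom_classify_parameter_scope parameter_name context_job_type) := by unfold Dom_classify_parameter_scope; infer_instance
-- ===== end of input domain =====

-- B replaces A's staged membership tests and per-job-type loop with a lookup in an
-- inverted index built once (name -> scope, stream overwriting job); same result.

-- ===== PORT A =====
def pvStreamParams : PySem.Set String := PySem.Set.ofList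
  ["StreamName", "StreamDocumentation", "MaxStreamRuns", "ShortDescription",
   "SchedulingRequiredFlag", "StreamRunDeletionType", "JobName", "JobCategory",
   "IsNotificationRequired"]

def pvSap : PySem.Set String := PySem.Set.ofList ["system", "report", "variant", "batch_user"]
def pvFT : PySem.Set String := PySem.Set.ofList ["source_agent", "target_agent", "source_path", "target_path"]
def pvCustom : PySem.Set String := PySem.Set.ofList
  ["ResourceName", "ShortDescription", "Status", "MaxParallelAllocations",
   "AutoReleaseFlag", "LogicalResourceType", "MasterLogicalResourceId",
   "DefaultMaxParallelAllocations"]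

def pvJobLevelParams : PySem.Dict String (PySem.Set String) :=
  PySem.Dict.mk [("SAP", pvSap), ("FILE_TRANSFER", pvFT), ("CUSTOM", pvCustom)]

-- the 'for job_type, params in JOB_LEVEL_PARAMETERS.items()' loop
def pvJobLoop (p : String) : List (String × PySem.Set String) → String
  | [] => "unknown"
  | (_, params) :: rest => if PySem.Set.contains params p then "job" else pvJobLoop p rest

def classify_parameter_scope (parameter_name : String) (context_job_type : Option String) : String :=
  if PySem.Set.contains pvStreamParams parameter_name then "stream"
  else
    match context_job_type with
    | some s =>
        if s ≠ "" ∧ PySem.Dict.contains pvJobLevelParams s then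
          if PySem.Set.contains (PySem.Dict.getD pvJobLevelParams s []) parameter_name then "job"
          else pvJobLoop parameter_name pvJobLevelParams.items
        else pvJobLoop parameter_name pvJobLevelParams.items
    | none => pvJobLoop parameter_name pvJobLevelParams.items

-- ===== PORT B =====
-- _PARAM_SCOPE: job names inserted first, then stream names overwrite (encodes priority)
def pvScopeMap : PySem.Dict String String :=
  pvStreamParams.foldl (fun d p => d.insert p "stream")
    (pvJobLevelParams.values.foldl (fun d ps => ps.foldl (fun d p => d.insert p "job") d)
      PySem.Dict.empty)

def classify_parameter_scope_alt (parameter_name : String) (context_job_type : Option String) : String :=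
  PySem.Dict.getD pvScopeMap parameter_name "unknown"

-- ===== PRECONDITION & SPEC =====
def Spec_classify_parameter_scope (parameter_name : String) (context_job_type : Option String) (out : String) : Prop := out = classify_parameter_scope_alt parameter_name context_job_type
instance (parameter_name : String) (context_job_type : Option String) (out : String) : Decidable (Spec_classify_parameter_scope parameter_name context_job_type out) := by unfold Spec_classify_parameter_scope; infer_instance

-- ===== CLAIM (what is proved, stated in full; the proofs are below) =====
def Claim_equal_classify_parameter_scope : Prop := ∀ (parameter_name : String) (context_job_type : Option String), Dom_classify_parameter_scope parameter_name context_job_type → Spec_classify_parameter_scope parameter_name context_job_type (classify_parameter_scope parameter_name context_job_type)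

-- ===== LEMMAS AND PROOFS =====

-- B's lookup table realizes "stream first, else any job set, else unknown"
theorem getD_scopeMap (p : String) :
    PySem.Dict.getD pvScopeMap p "unknown" =
      if p ∈ pvStreamParams then "stream"
      else if p ∈ pvSap ∨ p ∈ pvFT ∨ p ∈ pvCustom then "job" else "unknown" := by
  by_cases hs : p ∈ pvStreamParams
  · have h := hs
    simp [pvStreamParams, PySem.Set.mem_ofList] at h
    rcases h with h | h | h | h | h | h | h | h | h <;> subst h <;> decide
  · by_cases hj : p ∈ pvSap ∨ p ∈ pvFT ∨ p ∈ pvCustom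
    · rw [if_neg hs, if_pos hj]
      have h := hj
      simp [pvSap, pvFT, pvCustom, PySem.Set.mem_ofList] at h
      rcases h with ((h|h|h|h)|(h|h|h|h)|(h|h|h|h|h|h|h|h)) <;> subst h <;>
        first | decide | exact absurd (by decide) hs
    · rw [if_neg hs, if_neg hj]
      apply PySem.Dict.getD_of_not_contains
      have hk : pvScopeMap.keys =
        ["system", "report", "variant", "batch_user", "source_agent", "target_agent",
         "source_path", "target_path", "ResourceName", "ShortDescription", "Status",
         "MaxParallelAllocations", "AutoReleaseFlag", "LogicalResourceType",
         "MasterLogicalResourceId", "DefaultMaxParallelAllocations", "StreamName",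
         "StreamDocumentation", "MaxStreamRuns", "SchedulingRequiredFlag",
         "StreamRunDeletionType", "JobName", "JobCategory", "IsNotificationRequired"] := by
        decide
      rw [PySem.Dict.contains_eq_decide_mem_keys, hk]
      simp only [decide_eq_false_iff_not, List.mem_cons, List.not_mem_nil, or_false]
      simp [pvStreamParams, pvSap, pvFT, pvCustom, PySem.Set.mem_ofList] at hs hj
      tauto

theorem jobLoop_eq (p : String) :
    pvJobLoop p [("SAP", pvSap), ("FILE_TRANSFER", pvFT), ("CUSTOM", pvCustom)] =
      if p ∈ pvSap ∨ p ∈ pvFT ∨ p ∈ pvCustom then "job" else "unknown" := by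
  by_cases h1 : p ∈ pvSap <;> by_cases h2 : p ∈ pvFT <;> by_cases h3 : p ∈ pvCustom <;>
    simp [pvJobLoop, h1, h2, h3]

theorem alt_else (p : String) (h : p ∉ pvStreamParams) (c : Option String) :
    classify_parameter_scope_alt p c =
      if p ∈ pvSap ∨ p ∈ pvFT ∨ p ∈ pvCustom then "job" else "unknown" := by
  rw [classify_parameter_scope_alt, getD_scopeMap, if_neg h]

-- ===== VERDICT (by name: the statement is the Claim_ definition above) =====
theorem classify_parameter_scope_spec : Claim_equal_classify_parameter_scope := by
  intro p c _
  unfold Spec_classify_parameter_scope classify_parameter_scope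
  by_cases hs : p ∈ pvStreamParams
  · simp [classify_parameter_scope_alt, getD_scopeMap, hs]
  · rw [alt_else p hs c]
    cases c with
    | none => simp [hs, pvJobLevelParams, PySem.Dict.items, jobLoop_eq]
    | some s =>
        by_cases hc : s ≠ "" ∧ pvJobLevelParams.contains s = true
        · have hk : s = "SAP" ∨ s = "FILE_TRANSFER" ∨ s = "CUSTOM" := by
            have h2 := hc.2
            simp [PySem.Dict.contains, pvJobLevelParams] at h2
            rcases h2 with h | h | h <;> simp [h]
          rcases hk with h | h | h <;> subst h
          · by_cases hm : p ∈ pvSap <;>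
              simp [hs, hc, pvJobLevelParams, PySem.Dict.getD, PySem.Dict.get?,
                PySem.Dict.items, hm, jobLoop_eq]
          · by_cases hm : p ∈ pvFT <;>
              simp [hs, hc, pvJobLevelParams, PySem.Dict.getD, PySem.Dict.get?,
                PySem.Dict.items, hm, jobLoop_eq]
          · by_cases hm : p ∈ pvCustom <;>
              simp [hs, hc, pvJobLevelParams, PySem.Dict.getD, PySem.Dict.get?,
                PySem.Dict.items, hm, jobLoop_eq]
        · have hsb : PySem.Set.contains pvStreamParams p = false := by
            simp [hs]
          simp only [hsb, Bool.false_eq_true, if_false]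
          rw [if_neg hc]
          simp [pvJobLevelParams, jobLoop_eq]
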